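-- pv_equiv track=rewrite | github.com/tuan1011nguyen/ModelDetectSBD_MDT | datasetProcessing.py | generate_consecutive_pairs
-- ===== SOURCE A (Python) =====
-- def generate_consecutive_pairs(arr):
--     result = []
--     append_count = 0
--     for i in range(len(arr) - 1):
--         if append_count == 5:
--             append_count = 0
--             continue
--         result.append((arr[i], arr[i + 1]))
--         append_count += 1
--     return result
-- ===== SOURCE B (Python) =====
-- def generate_consecutive_pairs(arr):
--     # Block decomposition: each 6-element block arr[start:start+6] contributes
--     # exactly its internal adjacent pairs; the pair bridging two blocks is
--     # never formed, so no counter/skip logic is needed.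
--     result = []
--     for start in range(0, len(arr), 6):
--         chunk = arr[start:start + 6]
--         result.extend(zip(chunk, chunk[1:]))
--     return result
-- ===== Notes on version B (the rewrite author's own statement) =====
-- stated objective: alternative
-- what changed: Replaces A's element-by-element pass with a mutable five-appends-then-reset counter by a block decomposition: iterate over block starts 0,6,12,..., slice out each 6-element chunk and emit zip(chunk, chunk[1:]); the skipped cross-block pair is never constructed and no per-element state exists.
import Mathlib
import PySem

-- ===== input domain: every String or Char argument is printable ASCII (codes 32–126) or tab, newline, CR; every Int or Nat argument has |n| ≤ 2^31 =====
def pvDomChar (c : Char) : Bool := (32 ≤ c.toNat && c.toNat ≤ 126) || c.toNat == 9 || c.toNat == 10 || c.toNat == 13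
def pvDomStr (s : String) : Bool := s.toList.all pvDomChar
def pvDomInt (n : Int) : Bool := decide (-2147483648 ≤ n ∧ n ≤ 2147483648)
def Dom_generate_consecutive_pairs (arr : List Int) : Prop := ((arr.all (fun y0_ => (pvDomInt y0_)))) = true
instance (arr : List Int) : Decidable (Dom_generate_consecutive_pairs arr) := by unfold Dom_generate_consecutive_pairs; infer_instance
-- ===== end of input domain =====

-- B replaces A's per-element pass with its five-appends-then-reset counter by a block
-- decomposition: slice 6-element chunks and zip each chunk with its own tail (objective: alternative).

-- ===== PORT A =====
-- loop state: (result, append_count); arr[i]/arr[i+1] are always in range for i in range(len(arr)-1),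
-- so List.getD is exact there.
def generate_consecutive_pairs (arr : List Int) : List (Int × Int) :=
  (((List.range (arr.length - 1)).foldl
    (fun (s : List (Int × Int) × Int) i =>
      if s.2 = 5 then (s.1, 0)
      else (s.1 ++ [(arr.getD i 0, arr.getD (i + 1) 0)], s.2 + 1))
    ([], 0))).1

-- ===== PORT B =====
-- for start in range(0, len(arr), 6): chunk = arr[start:start+6]; result.extend(zip(chunk, chunk[1:]))
def generate_consecutive_pairs_alt (arr : List Int) : List (Int × Int) :=
  (PySem.List.pyRange 0 (arr.length : Int) 6).foldl
    (fun result start =>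
      result ++ (PySem.List.slice arr (some start) (some (start + 6))).zip
                (PySem.List.slice arr (some start) (some (start + 6))).tail) []

-- ===== PRECONDITION & SPEC =====
def Spec_generate_consecutive_pairs (arr : List Int) (out : List (Int × Int)) : Prop := out = generate_consecutive_pairs_alt arr
instance (arr : List Int) (out : List (Int × Int)) : Decidable (Spec_generate_consecutive_pairs arr out) := by unfold Spec_generate_consecutive_pairs; infer_instance

-- ===== CLAIM (what is proved, stated in full; the proofs are below) =====
def Claim_equal_generate_consecutive_pairs : Prop := ∀ (arr : List Int), Dom_generate_consecutive_pairs arr → Spec_generate_consecutive_pairs arr (generate_consecutive_pairs arr)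

-- ===== LEMMAS AND PROOFS =====

-- reference form 1 (A's shape): the kept pairs of a suffix starting at absolute index s
def pvPf : List Int → Nat → List (Int × Int)
  | a :: b :: t, s => (if s % 6 = 5 then [] else [(a, b)]) ++ pvPf (b :: t) (s + 1)
  | _, _ => []

-- reference form 2 (B's shape): chunk-by-chunk pairs
def pvCh (l : List Int) : List (Int × Int) :=
  if l = [] then [] else ((l.take 6).zip (l.take 6).tail) ++ pvCh (l.drop 6)
termination_by l.length
decreasing_by
  rename_i hne
  have hpos : 0 < l.length := List.length_pos_of_ne_nil hne
  simp
  omega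

theorem pvCh_nil : pvCh [] = [] := by
  unfold pvCh; simp

theorem pvCh_cons (a : Int) (t : List Int) :
    pvCh (a :: t) = (((a :: t).take 6).zip ((a :: t).take 6).tail) ++ pvCh ((a :: t).drop 6) := by
  conv_lhs => unfold pvCh
  simp

theorem pvPf_shift (l : List Int) : ∀ s, pvPf l (s + 6) = pvPf l s := by
  induction l with
  | nil => intro s; simp [pvPf]
  | cons a t ih =>
    intro s
    cases t with
    | nil => simp [pvPf]
    | cons b t2 =>
      have h : (s + 6) % 6 = s % 6 := Nat.add_mod_right s 6
      have h7 : s + 6 + 1 = (s + 1) + 6 := by omega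
      simp only [pvPf, h, h7, ih (s + 1)]

theorem pvPf_eq_pvCh : ∀ (n : Nat) (l : List Int), l.length ≤ n → pvPf l 0 = pvCh l := by
  intro n
  induction n with
  | zero =>
    intro l h
    have : l = [] := List.eq_nil_of_length_eq_zero (by omega)
    simp [this, pvPf, pvCh_nil]
  | succ n ih =>
    intro l h
    match l with
    | [] => simp [pvPf, pvCh_nil]
    | [a] => simp [pvPf, pvCh_nil, pvCh_cons]
    | [a, b] => simp [pvPf, pvCh_nil, pvCh_cons]
    | [a, b, c] => simp [pvPf, pvCh_nil, pvCh_cons]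
    | [a, b, c, d] => simp [pvPf, pvCh_nil, pvCh_cons]
    | [a, b, c, d, e] => simp [pvPf, pvCh_nil, pvCh_cons]
    | [a, b, c, d, e, f] => simp [pvPf, pvCh_nil, pvCh_cons]
    | a :: b :: c :: d :: e :: f :: g :: t =>
      have hlen : (g :: t).length ≤ n := by simp at h ⊢; omega
      have hrec := ih (g :: t) hlen
      have hsh : pvPf (g :: t) 6 = pvPf (g :: t) 0 := by
        have := pvPf_shift (g :: t) 0; simpa using this
      rw [pvCh_cons]
      simp only [pvPf]
      norm_num
      rw [hsh, hrec]

-- step-6 range cons/nil lemmas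
theorem pvRange6_nil (a b : Int) (h : ¬ a < b) : PySem.List.pyRange a b 6 = [] := by
  rw [PySem.List.pyRange_of_pos a b (by norm_num)]
  simp [h]

theorem pvRange6_cons (a b : Int) (h : a < b) : PySem.List.pyRange a b 6 = a :: PySem.List.pyRange (a + 6) b 6 := by
  rw [PySem.List.pyRange_of_pos a b (by norm_num), PySem.List.pyRange_of_pos (a + 6) b (by norm_num)]
  by_cases h6 : a + 6 < b
  · have hm : ((b - a + 6 - 1) / 6).toNat = ((b - (a + 6) + 6 - 1) / 6).toNat + 1 := by
      have : (b - a + 6 - 1) / 6 = (b - (a + 6) + 6 - 1) / 6 + 1 := by omega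
      omega
    rw [if_pos h, if_pos h6, hm, List.range_succ_eq_map]
    simp only [List.map_cons, List.map_map, Nat.cast_zero, mul_zero, add_zero]
    congr 1
    apply List.map_congr_left
    intro k _
    simp [Function.comp]
    ring
  · have hm : ((b - a + 6 - 1) / 6).toNat = 1 := by
      have : (b - a + 6 - 1) / 6 = 1 := by omega
      omega
    rw [if_pos h, if_neg h6, hm]
    simp

-- B's fold over block starts equals pvCh of the suffix
theorem pvB_fold : ∀ (n : Nat) (arr : List Int) (k : Nat) (acc : List (Int × Int)),
    (arr.drop k).length ≤ n →
    ((PySem.List.pyRange (k : Int) (arr.length : Int) 6).foldl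
      (fun result start =>
        result ++ (PySem.List.slice arr (some start) (some (start + 6))).zip
                  (PySem.List.slice arr (some start) (some (start + 6))).tail) acc)
    = acc ++ pvCh (arr.drop k) := by
  intro n
  induction n with
  | zero =>
    intro arr k acc h
    have hk : arr.length ≤ k := by simp at h; omega
    rw [pvRange6_nil _ _ (by exact_mod_cast not_lt.mpr (by exact_mod_cast hk))]
    have : arr.drop k = [] := List.drop_eq_nil_of_le hk
    simp [this, pvCh_nil]
  | succ n ih =>
    intro arr k acc h
    by_cases hk : k < arr.length
    · rw [pvRange6_cons _ _ (by exact_mod_cast hk)]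
      simp only [List.foldl_cons]
      have hcast : (k : Int) + 6 = ((k + 6 : Nat) : Int) := by push_cast; ring
      have hsl : PySem.List.slice arr (some (k : Int)) (some ((k : Int) + 6)) = (arr.drop k).take 6 := by
        rw [hcast, PySem.List.slice_natCast]
        congr 1
        omega
      have hlen : (arr.drop (k + 6)).length ≤ n := by
        simp at h ⊢; omega
      have hrec := ih arr (k + 6) (acc ++ ((arr.drop k).take 6).zip ((arr.drop k).take 6).tail) hlen
      rw [hsl, hcast, hrec]
      obtain ⟨a, t, ht⟩ : ∃ a t, arr.drop k = a :: t := by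
        cases hd : arr.drop k with
        | nil => exfalso; have := List.drop_eq_nil_iff.mp hd; omega
        | cons a t => exact ⟨a, t, rfl⟩
      have hdd : arr.drop (k + 6) = (arr.drop k).drop 6 := by
        rw [List.drop_drop]
      rw [hdd, ht, pvCh_cons]
      simp
    · rw [pvRange6_nil _ _ (by exact_mod_cast not_lt.mpr (by exact_mod_cast (not_lt.mp hk)))]
      have : arr.drop k = [] := List.drop_eq_nil_of_le (not_lt.mp hk)
      simp [this, pvCh_nil]

-- A's fold (range' form with absolute indices and counter k % 6) equals pvPf of the suffix
theorem pvPf_eq_fold (arr : List Int) :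
    ∀ (t : List Int) (k : Nat) (acc : List (Int × Int)), t = arr.drop k →
    ((List.range' k (t.length - 1)).foldl
      (fun (s : List (Int × Int) × Int) i =>
        if s.2 = 5 then (s.1, 0)
        else (s.1 ++ [(arr.getD i 0, arr.getD (i + 1) 0)], s.2 + 1))
      (acc, ((k % 6 : Nat) : Int))).1 = acc ++ pvPf t k := by
  intro t
  induction t with
  | nil => intro k acc _; simp [pvPf]
  | cons a t ih =>
    intro k acc hdrop
    cases t with
    | nil => simp [pvPf]
    | cons b t2 =>
      have h0 : arr[k]? = some a := by
        have h' : (List.drop k arr)[0]? = arr[k + 0]? := List.getElem?_drop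
        rw [← hdrop] at h'; simpa using h'.symm
      have h1 : arr[k + 1]? = some b := by
        have h' : (List.drop k arr)[1]? = arr[k + 1]? := List.getElem?_drop
        rw [← hdrop] at h'; simpa using h'.symm
      have hdrop' : (b :: t2) = arr.drop (k + 1) := by
        have ht : (List.drop k arr).tail = List.drop (k + 1) arr := List.tail_drop ..
        rw [← hdrop] at ht; simpa using ht
      have hlen : (a :: b :: t2).length - 1 = (b :: t2).length - 1 + 1 := by
        simp
      rw [hlen, List.range'_succ, List.foldl_cons]
      by_cases h : k % 6 = 5
      · have hc : ((k % 6 : Nat) : Int) = 5 := by rw [h]; norm_num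
        have hk1 : (k + 1) % 6 = 0 := by omega
        have := ih (k + 1) acc hdrop'
        rw [hk1] at this
        simp only [Nat.cast_zero] at this
        simp only [hc, if_true, this]
        simp [pvPf, h]
      · have hc : ¬ ((k % 6 : Nat) : Int) = 5 := by
          intro hx
          have : k % 6 = 5 := by exact_mod_cast hx
          exact h this
        have hk1 : (k + 1) % 6 = k % 6 + 1 := by omega
        have := ih (k + 1) (acc ++ [(arr.getD k 0, arr.getD (k + 1) 0)]) hdrop'
        rw [hk1] at this
        have hcast : (((k % 6 + 1 : Nat)) : Int) = ((k % 6 : Nat) : Int) + 1 := by push_cast; ring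
        rw [hcast] at this
        simp only [if_neg hc, this]
        simp [pvPf, h, h0, h1]

-- ===== VERDICT (by name: the statement is the Claim_ definition above) =====
theorem generate_consecutive_pairs_spec : Claim_equal_generate_consecutive_pairs := by
  intro arr _
  unfold Spec_generate_consecutive_pairs
  have hA : generate_consecutive_pairs arr = pvPf arr 0 := by
    unfold generate_consecutive_pairs
    have := pvPf_eq_fold arr arr 0 [] (by simp)
    simpa [List.range_eq_range'] using this
  have hB : generate_consecutive_pairs_alt arr = pvCh arr := by
    unfold generate_consecutive_pairs_alt
    have := pvB_fold arr.length arr 0 [] (by simp)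
    simpa using this
  rw [hA, hB, pvPf_eq_pvCh arr.length arr le_rfl]
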